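-- pv_equiv track=rewrite | github.com/geolohmar-star/vorgangswerk | formulare/views.py | _loop_iterationen
-- ===== SOURCE A (Python) =====
-- def _loop_iterationen(gesammelte_daten):
--     """Gibt archivierte Loop-Iterationen als Liste zurueck."""
--     iterationen = []
--     i = 0
--     while True:
--         praeffix = f"__loop_{i}__"
--         iteration = {
--             k[len(praeffix):]: v
--             for k, v in gesammelte_daten.items()
--             if k.startswith(praeffix)
--         }
--         if not iteration:
--             break
--         iterationen.append(iteration)
--         i += 1
--     aktuell = {k: v for k, v in gesammelte_daten.items() if not k.startswith("__")}
--     iterationen.append(aktuell)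
--     return iterationen
-- ===== SOURCE B (Python) =====
-- def _loop_iterationen(gesammelte_daten):
--     """Gibt archivierte Loop-Iterationen als Liste zurueck."""
--     groups = {}
--     aktuell = {}
--     for k, v in gesammelte_daten.items():
--         if k.startswith("__loop_"):
--             idx, sep, suffix = k[7:].partition("__")
--             if sep and idx.isdigit():
--                 groups.setdefault(idx, {})[suffix] = v
--         elif not k.startswith("__"):
--             aktuell[k] = v
--     iterationen = []
--     i = 0
--     while str(i) in groups:
--         iterationen.append(groups[str(i)])
--         i += 1
--     iterationen.append(aktuell)
--     return iterationen
-- ===== Notes on version B (the rewrite author's own statement) =====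
-- stated objective: alternative
-- what changed: Instead of rescanning all keys once per loop index until an index has no matches, B makes a single pass over the items, splitting each '__loop_'-key at the first '__' to group suffix/value pairs into per-index-string dicts, then emits groups for str(0), str(1), ... until the first gap.
import Mathlib
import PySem

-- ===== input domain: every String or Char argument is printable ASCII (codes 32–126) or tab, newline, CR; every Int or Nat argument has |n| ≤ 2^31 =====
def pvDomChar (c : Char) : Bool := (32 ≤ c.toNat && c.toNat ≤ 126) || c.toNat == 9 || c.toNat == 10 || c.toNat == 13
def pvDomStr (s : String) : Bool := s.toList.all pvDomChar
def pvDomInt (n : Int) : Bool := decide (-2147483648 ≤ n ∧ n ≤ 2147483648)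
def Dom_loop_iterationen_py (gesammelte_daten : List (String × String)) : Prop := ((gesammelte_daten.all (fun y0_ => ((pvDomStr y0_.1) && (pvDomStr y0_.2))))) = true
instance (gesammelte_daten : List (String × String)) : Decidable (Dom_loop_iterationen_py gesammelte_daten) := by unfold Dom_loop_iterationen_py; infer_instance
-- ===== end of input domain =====

-- B replaces A's rescan-of-all-keys-per-iteration-index with a single grouping pass over the keys (objective: alternative).

-- ===== PORT A =====
-- f"__loop_{i}__"
def aPraeffix (i : Int) : String := "__loop_" ++ PySem.Int.toStr i ++ "__"

-- the dict comprehension {k[len(praeffix):]: v for k, v in items if k.startswith(praeffix)} as a fold of inserts;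
-- k[len(praeffix):] has a nonnegative index, so the slice is exactly List.drop
def aIteration (gesammelte_daten : List (String × String)) (i : Int) : PySem.Dict String String :=
  gesammelte_daten.foldl (fun d kv =>
    if PySem.Str.startswith kv.1 (aPraeffix i) then
      d.insert (String.ofList (kv.1.toList.drop ((aPraeffix i).toList.length))) kv.2
    else d) PySem.Dict.empty

-- 'while True: … break'; the fuel (length+1) only makes the loop total: a key can start with at most one
-- praeffix, so at most `length` iteration indices are nonempty and the loop always breaks before fuel runs out
def aLoop (gd : List (String × String)) : Nat → Int → List (List (String × String)) → List (List (String × String))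
  | 0, _, acc => acc.reverse
  | fuel+1, i, acc =>
    let it := aIteration gd i
    if it.items.isEmpty then acc.reverse
    else aLoop gd fuel (i + 1) (it.items :: acc)

def aAktuell (gd : List (String × String)) : PySem.Dict String String :=
  gd.foldl (fun d kv => if PySem.Str.startswith kv.1 "__" then d else d.insert kv.1 kv.2) PySem.Dict.empty

def loop_iterationen_py (gesammelte_daten : List (String × String)) : List (List (String × String)) :=
  aLoop gesammelte_daten (gesammelte_daten.length + 1) 0 [] ++ [(aAktuell gesammelte_daten).items]

-- ===== PORT B =====
-- hand port of rest.partition("__") (PySem has no partition): first occurrence of "__";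
-- Python's 3-tuple (pre, sep, post) with sep == "" on no match is Option (pre, post) here — exact
def bPartition : List Char → Option (List Char × List Char)
  | [] => none
  | c :: cs =>
    if c = '_' ∧ cs.head? = some '_' then some ([], cs.tail)
    else (bPartition cs).map (fun p => (c :: p.1, p.2))

-- the loop body: k[7:] has a nonnegative index, so the slice is exactly List.drop;
-- groups.setdefault(idx, {})[suffix] = v is Dict.modify; 'if sep and idx.isdigit()' is the match + strIsdigit test
def bStep (st : PySem.Dict String (PySem.Dict String String) × PySem.Dict String String)
    (kv : String × String) : PySem.Dict String (PySem.Dict String String) × PySem.Dict String String :=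
  if PySem.Str.startswith kv.1 "__loop_" then
    match bPartition (kv.1.toList.drop 7) with
    | some (idx, suffix) =>
      if PySem.Chars.strIsdigit idx then
        (st.1.modify (String.ofList idx) PySem.Dict.empty (fun d => d.insert (String.ofList suffix) kv.2), st.2)
      else st
    | none => st
  else if PySem.Str.startswith kv.1 "__" then st
  else (st.1, st.2.insert kv.1 kv.2)

-- 'while str(i) in groups': groups has at most `length` distinct keys, so fuel length+1 suffices;
-- groups[str(i)] under the 'in' guard is exactly getD
def bEmit (groups : PySem.Dict String (PySem.Dict String String)) :
    Nat → Int → List (List (String × String)) → List (List (String × String))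
  | 0, _, out => out.reverse
  | fuel+1, i, out =>
    if groups.contains (PySem.Int.toStr i) then
      bEmit groups fuel (i + 1) ((groups.getD (PySem.Int.toStr i) PySem.Dict.empty).items :: out)
    else out.reverse

def loop_iterationen_py_alt (gesammelte_daten : List (String × String)) : List (List (String × String)) :=
  let st := gesammelte_daten.foldl bStep (PySem.Dict.empty, PySem.Dict.empty)
  bEmit st.1 (gesammelte_daten.length + 1) 0 [] ++ [st.2.items]

-- ===== PRECONDITION & SPEC =====
def Spec_loop_iterationen_py (gesammelte_daten : List (String × String)) (out : List (List (String × String))) : Prop := out = loop_iterationen_py_alt gesammelte_daten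
instance (gesammelte_daten : List (String × String)) (out : List (List (String × String))) : Decidable (Spec_loop_iterationen_py gesammelte_daten out) := by unfold Spec_loop_iterationen_py; infer_instance

-- ===== CLAIM (what is proved, stated in full; the proofs are below) =====
def Claim_equal_loop_iterationen_py : Prop := ∀ (gesammelte_daten : List (String × String)), Dom_loop_iterationen_py gesammelte_daten → Spec_loop_iterationen_py gesammelte_daten (loop_iterationen_py gesammelte_daten)

-- ===== LEMMAS AND PROOFS =====

-- proof-side view of B's loop body: the key either parses as (index string, suffix) or not
def pKey (k : String) : Option (String × String) :=
  if PySem.Str.startswith k "__loop_" then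
    match bPartition (k.toList.drop 7) with
    | some (idx, suffix) =>
      if PySem.Chars.strIsdigit idx then some (String.ofList idx, String.ofList suffix) else none
    | none => none
  else none

theorem startswith_dunder_of_loop {k : String}
    (h : PySem.Str.startswith k "__loop_" = true) : PySem.Str.startswith k "__" = true := by
  rw [PySem.Str.startswith_eq, PySem.Chars.startswith_iff] at h ⊢
  exact List.IsPrefix.trans (by decide) h

theorem bStep_eq (st : PySem.Dict String (PySem.Dict String String) × PySem.Dict String String)
    (kv : String × String) :
    bStep st kv = match pKey kv.1 with
      | some (s, suffix) => (st.1.modify s PySem.Dict.empty (fun d => d.insert suffix kv.2), st.2)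
      | none => if PySem.Str.startswith kv.1 "__" then st else (st.1, st.2.insert kv.1 kv.2) := by
  rw [bStep, pKey]
  by_cases h7 : PySem.Str.startswith kv.1 "__loop_" = true
  · have hd2 : PySem.Chars.startswith kv.1.toList ['_', '_'] = true := by
      simpa using startswith_dunder_of_loop h7
    rw [if_pos h7, if_pos h7]
    rcases hp : bPartition (kv.1.toList.drop 7) with _ | ⟨idx, suffix⟩
    · simp [hd2]
    · by_cases hd : PySem.Chars.strIsdigit idx = true
      · simp [hd]
      · simp [hd, hd2]
  · rw [if_neg h7, if_neg h7]

theorem bStep_none {gs : PySem.Dict String (PySem.Dict String String)} {ak : PySem.Dict String String}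
    {kv : String × String} (h : pKey kv.1 = none) :
    bStep (gs, ak) kv = (gs, if PySem.Str.startswith kv.1 "__" then ak else ak.insert kv.1 kv.2) := by
  rw [bStep_eq, h]
  split
  case h_1 => simp_all
  case h_2 => split_ifs <;> rfl

theorem bStep_some {gs : PySem.Dict String (PySem.Dict String String)} {ak : PySem.Dict String String}
    {kv : String × String} {s suffix : String} (h : pKey kv.1 = some (s, suffix)) :
    bStep (gs, ak) kv = (gs.modify s PySem.Dict.empty (fun d => d.insert suffix kv.2), ak) := by
  rw [bStep_eq, h]

-- ---- digit-string facts about f"{i}" ----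

theorem isdigit_digitChar (d : Nat) (h : d < 10) : PySem.Chars.isdigit (Nat.digitChar d) = true := by
  interval_cases d <;> decide

theorem toDigitsCore10_eq (n : Nat) : ∀ (fuel : Nat) (acc : List Char), n < fuel → 0 < n →
    Nat.toDigitsCore 10 fuel n acc = ((Nat.digits 10 n).map Nat.digitChar).reverse ++ acc := by
  induction n using Nat.strong_induction_on with
  | _ n IH =>
    intro fuel acc hf hn
    match fuel with
    | fuel + 1 =>
      rw [Nat.toDigitsCore]
      by_cases h : n / 10 = 0
      · simp only [h, if_true]
        rw [Nat.digits_def' (by norm_num) hn, h]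
        simp
      · simp only [h, if_false]
        have h1 : n / 10 < n := Nat.div_lt_self hn (by norm_num)
        rw [IH (n / 10) h1 fuel _ (by omega) (Nat.pos_of_ne_zero h)]
        rw [Nat.digits_def' (by norm_num) hn]
        simp

theorem toDigits10_eq (n : Nat) (hn : 0 < n) :
    Nat.toDigits 10 n = ((Nat.digits 10 n).map Nat.digitChar).reverse := by
  have := toDigitsCore10_eq n (n+1) [] (by omega) hn
  simpa [Nat.toDigits] using this

theorem toDigits_all_digit (j : Nat) : ∀ c ∈ Nat.toDigits 10 j, PySem.Chars.isdigit c = true := by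
  rcases Nat.eq_zero_or_pos j with rfl | hj
  · intro c hc
    rw [show Nat.toDigits 10 0 = ['0'] from by decide, List.mem_singleton] at hc
    subst hc
    decide
  · rw [toDigits10_eq j hj]
    intro c hc
    simp only [List.mem_reverse, List.mem_map] at hc
    obtain ⟨d, hd, rfl⟩ := hc
    exact isdigit_digitChar d (Nat.digits_lt_base (by norm_num) hd)

theorem toDigits_ne_nil (j : Nat) : Nat.toDigits 10 j ≠ [] := by
  rcases Nat.eq_zero_or_pos j with rfl | hj
  · decide
  · rw [toDigits10_eq j hj]
    simp only [ne_eq, List.reverse_eq_nil_iff, List.map_eq_nil_iff, Nat.digits_ne_nil_iff_ne_zero]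
    omega

theorem strIsdigit_toDigits (j : Nat) : PySem.Chars.strIsdigit (Nat.toDigits 10 j) = true := by
  rw [PySem.Chars.strIsdigit]
  rw [Bool.and_eq_true, List.all_eq_true]
  exact ⟨by simpa [List.isEmpty_iff] using toDigits_ne_nil j, toDigits_all_digit j⟩

theorem digit_ne_underscore {c : Char} (h : PySem.Chars.isdigit c = true) : c ≠ '_' := by
  intro hc; rw [hc] at h; exact absurd h (by decide)

-- ---- bPartition facts ----

theorem bPartition_some : ∀ {l p s : List Char}, bPartition l = some (p, s) →
    l = p ++ '_' :: '_' :: s := by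
  intro l
  induction l with
  | nil => intro p s h; simp [bPartition] at h
  | cons c cs ih =>
    intro p s h
    rw [bPartition] at h
    split at h
    case isTrue hc =>
      obtain ⟨hc1, hc2⟩ := hc
      simp only [Option.some_inj, Prod.mk.injEq] at h
      obtain ⟨hp, hs⟩ := h
      rcases cs with _ | ⟨c2, cs⟩
      · simp at hc2
      · simp only [List.head?_cons, Option.some_inj] at hc2
        simp only [List.tail_cons] at hs
        subst hp hs hc1 hc2
        simp
    case isFalse hc =>
      rcases hx : bPartition cs with _ | ⟨p', s'⟩
      · rw [hx] at h; simp at h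
      · rw [hx] at h
        simp only [Option.map_some, Option.some_inj, Prod.mk.injEq] at h
        obtain ⟨hp, hs⟩ := h
        subst hs
        rw [← hp, List.cons_append]
        rw [ih hx]

theorem bPartition_digits {D : List Char} (hD : ∀ c ∈ D, PySem.Chars.isdigit c = true)
    (t : List Char) : bPartition (D ++ '_' :: '_' :: t) = some (D, t) := by
  induction D with
  | nil => simp [bPartition]
  | cons c D ih =>
    have hc : c ≠ '_' := digit_ne_underscore (hD c (by simp))
    rw [List.cons_append, bPartition, if_neg (by simp [hc]),
        ih (fun x hx => hD x (by simp [hx]))]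
    rfl

-- ---- the praeffix/parse correspondence ----

theorem aPraeffix_toList (j : Nat) :
    (aPraeffix (j : Int)).toList = "__loop_".toList ++ Nat.toDigits 10 j ++ ['_', '_'] := by
  have h2 : ("__" : String).toList = ['_', '_'] := rfl
  simp [aPraeffix, String.toList_append, PySem.Int.toList_toStr, PySem.Int.toChars, h2]

theorem ofList_toDigits (j : Nat) : String.ofList (Nat.toDigits 10 j) = PySem.Int.toStr (j : Int) := by
  apply String.toList_inj.mp
  rw [String.toList_ofList, PySem.Int.toList_toStr]
  simp [PySem.Int.toChars]

theorem parse_of_startswith (j : Nat) (k : String)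
    (h : PySem.Str.startswith k (aPraeffix (j : Int)) = true) :
    pKey k = some (PySem.Int.toStr (j : Int),
      String.ofList (k.toList.drop ((aPraeffix (j : Int)).toList.length))) := by
  rw [PySem.Str.startswith_eq, PySem.Chars.startswith_iff, aPraeffix_toList] at h
  obtain ⟨t, ht⟩ := h
  have hL : k.toList = "__loop_".toList ++ (Nat.toDigits 10 j ++ ('_' :: '_' :: t)) := by
    rw [← ht]; simp
  have hsw7 : PySem.Str.startswith k "__loop_" = true := by
    rw [PySem.Str.startswith_eq, PySem.Chars.startswith_iff, hL]
    exact ⟨_, rfl⟩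
  have hlen7 : ("__loop_".toList).length = 7 := rfl
  have hrest : k.toList.drop 7 = Nat.toDigits 10 j ++ ('_' :: '_' :: t) := by
    rw [hL, ← hlen7, List.drop_left]
  have hR : k.toList.drop ((aPraeffix (j : Int)).toList.length) = t := by
    rw [aPraeffix_toList, ← ht, List.drop_left]
  rw [pKey, if_pos hsw7, hrest, bPartition_digits (toDigits_all_digit j) t]
  simp only [strIsdigit_toDigits j, if_true, hR, ofList_toDigits j]

theorem startswith_of_parse (j : Nat) (k : String) (suffix : String)
    (h : pKey k = some (PySem.Int.toStr (j : Int), suffix)) :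
    PySem.Str.startswith k (aPraeffix (j : Int)) = true ∧
      suffix = String.ofList (k.toList.drop ((aPraeffix (j : Int)).toList.length)) := by
  rw [pKey] at h
  by_cases hsw : PySem.Str.startswith k "__loop_" = true
  case neg => rw [if_neg hsw] at h; simp at h
  rw [if_pos hsw] at h
  rcases hp : bPartition (k.toList.drop 7) with _ | ⟨idx, suf⟩ <;> rw [hp] at h <;> dsimp only at h
  · simp at h
  · by_cases hd : PySem.Chars.strIsdigit idx = true
    case neg => rw [if_neg hd] at h; simp at h
    rw [if_pos hd] at h
    simp only [Option.some_inj, Prod.mk.injEq] at h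
    obtain ⟨hidx, hsuf⟩ := h
    have hidxL : idx = Nat.toDigits 10 j := by
      have := congrArg String.toList hidx
      rw [String.toList_ofList, PySem.Int.toList_toStr] at this
      simpa [PySem.Int.toChars] using this
    have hdec := bPartition_some hp
    have hk7 : k.toList = "__loop_".toList ++ k.toList.drop 7 := by
      rw [PySem.Str.startswith_eq, PySem.Chars.startswith_iff, List.prefix_iff_eq_take,
          show ("__loop_".toList).length = 7 from rfl] at hsw
      conv_lhs => rw [← List.take_append_drop 7 k.toList]
      rw [← hsw]
    have hK : k.toList = ("__loop_".toList ++ Nat.toDigits 10 j ++ ['_', '_']) ++ suf := by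
      rw [hk7, hdec, hidxL]; simp
    constructor
    · rw [PySem.Str.startswith_eq, PySem.Chars.startswith_iff, aPraeffix_toList]
      exact ⟨suf, by rw [hK]⟩
    · rw [← hsuf]
      congr 1
      rw [aPraeffix_toList, hK, List.drop_left]

theorem not_startswith_of_parse_none {kv : String × String} (j : Nat)
    (hp : pKey kv.1 = none) :
    ¬ PySem.Str.startswith kv.1 (aPraeffix (j : Int)) = true := by
  intro hc
  rw [parse_of_startswith j kv.1 hc] at hp
  simp at hp

theorem not_startswith_of_parse_ne {kv : String × String} (j : Nat) {s suffix : String}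
    (hp : pKey kv.1 = some (s, suffix)) (hne : PySem.Int.toStr (j : Int) ≠ s) :
    ¬ PySem.Str.startswith kv.1 (aPraeffix (j : Int)) = true := by
  intro hc
  rw [parse_of_startswith j kv.1 hc] at hp
  simp only [Option.some_inj, Prod.mk.injEq] at hp
  exact hne hp.1

theorem startswith_dunder_of_parse (k : String) {s suffix : String}
    (h : pKey k = some (s, suffix)) : PySem.Str.startswith k "__" = true := by
  rw [pKey] at h
  by_cases hsw : PySem.Str.startswith k "__loop_" = true
  · exact startswith_dunder_of_loop hsw
  · rw [if_neg hsw] at h; simp at h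

-- ---- the folds agree ----

theorem snd_foldl_bStep (data : List (String × String)) :
    ∀ (gs : PySem.Dict String (PySem.Dict String String)) (ak : PySem.Dict String String),
    (data.foldl bStep (gs, ak)).2
      = data.foldl (fun d kv => if PySem.Str.startswith kv.1 "__" then d else d.insert kv.1 kv.2) ak := by
  induction data with
  | nil => intro gs ak; rfl
  | cons kv data ih =>
    intro gs ak
    simp only [List.foldl_cons]
    rcases hp : pKey kv.1 with _ | ⟨s, suffix⟩
    · rw [bStep_none hp]
      by_cases hsw : PySem.Str.startswith kv.1 "__" = true
      · rw [if_pos hsw]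
        exact ih gs ak
      · rw [if_neg hsw]
        exact ih gs (ak.insert kv.1 kv.2)
    · rw [bStep_some hp]
      rw [if_pos (startswith_dunder_of_parse kv.1 hp)]
      exact ih _ ak

theorem getD_foldl_bStep (data : List (String × String)) (j : Nat) :
    ∀ (gs : PySem.Dict String (PySem.Dict String String)) (ak : PySem.Dict String String),
    ((data.foldl bStep (gs, ak)).1).getD (PySem.Int.toStr (j : Int)) PySem.Dict.empty
      = data.foldl (fun d kv =>
          if PySem.Str.startswith kv.1 (aPraeffix (j : Int)) then
            d.insert (String.ofList (kv.1.toList.drop ((aPraeffix (j : Int)).toList.length))) kv.2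
          else d) (gs.getD (PySem.Int.toStr (j : Int)) PySem.Dict.empty) := by
  induction data with
  | nil => intro gs ak; rfl
  | cons kv data ih =>
    intro gs ak
    simp only [List.foldl_cons]
    rcases hp : pKey kv.1 with _ | ⟨s, suffix⟩
    · rw [bStep_none hp, if_neg (not_startswith_of_parse_none j hp)]
      exact ih gs _
    · rw [bStep_some hp]
      by_cases hjj : PySem.Int.toStr (j : Int) = s
      · subst hjj
        obtain ⟨hswj, hsufj⟩ := startswith_of_parse j kv.1 suffix hp
        rw [if_pos hswj, ih _ ak]
        congr 1
        rw [PySem.Dict.getD_modify, if_pos rfl, ← hsufj]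
      · rw [if_neg (not_startswith_of_parse_ne j hp hjj), ih _ ak]
        congr 1
        rw [PySem.Dict.getD_modify, if_neg hjj]

theorem contains_foldl_bStep (data : List (String × String)) (j : Nat) :
    ∀ (gs : PySem.Dict String (PySem.Dict String String)) (ak : PySem.Dict String String),
    ((data.foldl bStep (gs, ak)).1).contains (PySem.Int.toStr (j : Int))
      = (gs.contains (PySem.Int.toStr (j : Int))
          || data.any (fun kv => PySem.Str.startswith kv.1 (aPraeffix (j : Int)))) := by
  induction data with
  | nil => intro gs ak; simp
  | cons kv data ih =>
    intro gs ak
    simp only [List.foldl_cons, List.any_cons]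
    rcases hp : pKey kv.1 with _ | ⟨s, suffix⟩
    · rw [bStep_none hp, ih, Bool.eq_false_iff.mpr (not_startswith_of_parse_none j hp)]
      simp
    · rw [bStep_some hp, ih]
      rw [PySem.Dict.contains_modify]
      by_cases hjj : PySem.Int.toStr (j : Int) = s
      · subst hjj
        obtain ⟨hswj, -⟩ := startswith_of_parse j kv.1 suffix hp
        have hswj' : PySem.Chars.startswith kv.1.toList (aPraeffix (j : Int)).toList = true := by
          rw [← PySem.Str.startswith_eq]; exact hswj
        simp [hswj']
      · have hbeq : ((PySem.Int.toStr (j : Int)) == s) = false := by simp [hjj]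
        have hsw0 : PySem.Chars.startswith kv.1.toList (aPraeffix (j : Int)).toList = false := by
          rw [← PySem.Str.startswith_eq]
          exact Bool.eq_false_iff.mpr (not_startswith_of_parse_ne j hp hjj)
        simp [hbeq, hsw0]

theorem insert_items_ne_nil {d : PySem.Dict String String} (k : String) (v : String) :
    (d.insert k v).items ≠ [] := by
  rw [PySem.Dict.items_insert]
  split
  case isTrue hc =>
    intro hnil
    rw [List.map_eq_nil_iff] at hnil
    rw [PySem.Dict.contains_iff_mem_keys] at hc
    simp only [PySem.Dict.keys, hnil] at hc
    simp at hc
  case isFalse _ => simp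

theorem foldl_aIter_isEmpty (data : List (String × String)) (j : Nat) :
    ∀ d : PySem.Dict String String,
    ((data.foldl (fun d kv =>
        if PySem.Str.startswith kv.1 (aPraeffix (j : Int)) then
          d.insert (String.ofList (kv.1.toList.drop ((aPraeffix (j : Int)).toList.length))) kv.2
        else d) d).items.isEmpty)
      = (d.items.isEmpty && !(data.any (fun kv => PySem.Str.startswith kv.1 (aPraeffix (j : Int))))) := by
  induction data with
  | nil => intro d; simp
  | cons kv data ih =>
    intro d
    simp only [List.foldl_cons, List.any_cons]
    by_cases hsw : PySem.Str.startswith kv.1 (aPraeffix (j : Int)) = true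
    · rw [if_pos hsw, ih]
      have : ((d.insert (String.ofList (kv.1.toList.drop ((aPraeffix (j : Int)).toList.length))) kv.2).items).isEmpty = false := by
        rw [List.isEmpty_eq_false_iff]
        exact insert_items_ne_nil _ _
      rw [this, hsw]
      simp
    · rw [if_neg hsw, ih, Bool.eq_false_iff.mpr hsw]
      simp

theorem aIteration_isEmpty (data : List (String × String)) (j : Nat) :
    (aIteration data (j : Int)).items.isEmpty
      = !(data.any (fun kv => PySem.Str.startswith kv.1 (aPraeffix (j : Int)))) := by
  rw [aIteration, foldl_aIter_isEmpty data j]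
  rfl

theorem aLoop_eq_bEmit (data : List (String × String)) (fuel : Nat) :
    ∀ (j : Nat) (acc : List (List (String × String))),
      aLoop data fuel (j : Int) acc
        = bEmit (data.foldl bStep (PySem.Dict.empty, PySem.Dict.empty)).1 fuel (j : Int) acc := by
  induction fuel with
  | zero => intro j acc; rfl
  | succ fuel ih =>
    intro j acc
    rw [aLoop, bEmit]
    have hcont : ((data.foldl bStep (PySem.Dict.empty, PySem.Dict.empty)).1).contains (PySem.Int.toStr (j : Int))
        = !(aIteration data (j : Int)).items.isEmpty := by
      rw [contains_foldl_bStep data j, aIteration_isEmpty, PySem.Dict.contains_empty]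
      simp
    have hval : ((data.foldl bStep (PySem.Dict.empty, PySem.Dict.empty)).1).getD (PySem.Int.toStr (j : Int)) PySem.Dict.empty
        = aIteration data (j : Int) := by
      rw [getD_foldl_bStep data j, PySem.Dict.getD_empty]
      rfl
    by_cases he : (aIteration data (j : Int)).items.isEmpty = true
    · rw [if_pos he, hcont, he]
      simp
    · rw [if_neg he, hcont, Bool.eq_false_iff.mpr he]
      simp only [Bool.not_false, if_true, hval]
      have hcast : ((j : Int) + 1) = ((j + 1 : Nat) : Int) := by push_cast; ring
      rw [hcast, ih (j + 1)]

theorem main_eq (gd : List (String × String)) : loop_iterationen_py gd = loop_iterationen_py_alt gd := by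
  rw [loop_iterationen_py, loop_iterationen_py_alt]
  congr 1
  · have h0 : (0 : Int) = ((0 : Nat) : Int) := rfl
    rw [h0, aLoop_eq_bEmit gd (gd.length + 1) 0]
  · rw [snd_foldl_bStep gd PySem.Dict.empty PySem.Dict.empty]
    rfl

-- ===== VERDICT (by name: the statement is the Claim_ definition above) =====
theorem loop_iterationen_py_spec : Claim_equal_loop_iterationen_py := by
  intro gd _
  unfold Spec_loop_iterationen_py
  exact main_eq gd
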